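-- pv_equiv track=rewrite | github.com/lucasmoeskops/advent-of-code-python | src/y2024/21. Keypad Conundrum.py | find_numerical_route
-- ===== SOURCE A (Python) =====
-- NUMERICAL_LOOKUP = {
--     '7': (0, 0),
--     '8': (1, 0),
--     '9': (2, 0),
--     '4': (0, 1),
--     '5': (1, 1),
--     '6': (2, 1),
--     '1': (0, 2),
--     '2': (1, 2),
--     '3': (2, 2),
--     '0': (1, 3),
--     'A': (2, 3),
-- }
--
-- def make_route(sx, sy, ex, ey, horizontal_first=True):
--     horizontal = ('>' * (ex - sx) if ex > sx else '<' * (sx - ex))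
--     vertical = ('v' * (ey - sy) if ey > sy else '^' * (sy - ey))
--     return ((horizontal + vertical) if horizontal_first else (vertical + horizontal)) + 'A'
--
-- def find_numerical_route(code, p=None):
--     if not code:
--         yield ''
--         return
--
--     x, y = p if p else NUMERICAL_LOOKUP['A']
--     c = code[0]
--     nx, ny = NUMERICAL_LOOKUP[c]
--
--     option_1 = not (x == 0 and ny == 3) and make_route(x, y, nx, ny, horizontal_first=False)
--     if option_1:
--         for rest in find_numerical_route(code[1:], (nx, ny)):
--             yield option_1 + rest
--
--     option_2 = not (nx == 0 and y == 3) and make_route(x, y, nx, ny, horizontal_first=True)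
--     if option_2 and option_1 != option_2:
--         for rest in find_numerical_route(code[1:], (nx, ny)):
--             yield option_2 + rest
-- ===== SOURCE B (Python) =====
-- NUMERICAL_LOOKUP = {
--     '7': (0, 0),
--     '8': (1, 0),
--     '9': (2, 0),
--     '4': (0, 1),
--     '5': (1, 1),
--     '6': (2, 1),
--     '1': (0, 2),
--     '2': (1, 2),
--     '3': (2, 2),
--     '0': (1, 3),
--     'A': (2, 3),
-- }
--
-- def make_route(sx, sy, ex, ey, horizontal_first=True):
--     horizontal = ('>' * (ex - sx) if ex > sx else '<' * (sx - ex))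
--     vertical = ('v' * (ey - sy) if ey > sy else '^' * (sy - ey))
--     return ((horizontal + vertical) if horizontal_first else (vertical + horizontal)) + 'A'
--
-- def find_numerical_route(code, p=None):
--     # Iterative product: one forward pass extending all partial routes per character.
--     x, y = p if p else NUMERICAL_LOOKUP['A']
--     results = ['']
--     for c in code:
--         nx, ny = NUMERICAL_LOOKUP[c]
--         opts = []
--         if not (x == 0 and ny == 3):
--             opts.append(make_route(x, y, nx, ny, horizontal_first=False))
--         h = make_route(x, y, nx, ny, horizontal_first=True)
--         if not (nx == 0 and y == 3) and h not in opts: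
--             opts.append(h)
--         results = [r + o for r in results for o in opts]
--         x, y = nx, ny
--     yield from results
-- ===== Notes on version B (the rewrite author's own statement) =====
-- stated objective: alternative
-- what changed: Replaces A's generator recursion (which re-runs the whole suffix recursion under each of the two guarded options) by a single forward pass that builds the per-character ordered option list and extends all partial routes iteratively, i.e. an explicit cartesian product.
import Mathlib
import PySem

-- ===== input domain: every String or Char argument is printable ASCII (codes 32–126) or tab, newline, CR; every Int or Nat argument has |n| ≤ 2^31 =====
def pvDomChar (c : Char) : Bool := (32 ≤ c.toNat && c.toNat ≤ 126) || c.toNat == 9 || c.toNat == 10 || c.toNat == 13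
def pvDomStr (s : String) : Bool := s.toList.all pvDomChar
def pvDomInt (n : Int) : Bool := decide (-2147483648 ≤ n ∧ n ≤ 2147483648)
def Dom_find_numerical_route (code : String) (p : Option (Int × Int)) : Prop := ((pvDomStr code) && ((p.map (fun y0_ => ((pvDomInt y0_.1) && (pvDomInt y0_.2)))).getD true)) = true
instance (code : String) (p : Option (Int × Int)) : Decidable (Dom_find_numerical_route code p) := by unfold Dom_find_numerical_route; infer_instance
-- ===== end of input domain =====

-- B replaces A's generator recursion by one forward pass that extends all partial
-- routes per character (an iterative cartesian product); same values in the same order.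

-- shared helper: the NUMERICAL_LOOKUP dict (distinct literal keys → direct match)
def numLookup (c : Char) : Option (Int × Int) :=
  if c = '7' then some (0, 0) else if c = '8' then some (1, 0)
  else if c = '9' then some (2, 0) else if c = '4' then some (0, 1)
  else if c = '5' then some (1, 1) else if c = '6' then some (2, 1)
  else if c = '1' then some (0, 2) else if c = '2' then some (1, 2)
  else if c = '3' then some (2, 2) else if c = '0' then some (1, 3)
  else if c = 'A' then some (2, 3) else none

-- shared helper: make_route (both Pythons use the identical module helper)
def make_route (sx sy ex ey : Int) (horizontal_first : Bool) : String :=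
  let horizontal : List Char :=
    if ex > sx then List.replicate (ex - sx).toNat '>' else List.replicate (sx - ex).toNat '<'
  let vertical : List Char :=
    if ey > sy then List.replicate (ey - sy).toNat 'v' else List.replicate (sy - ey).toNat '^'
  String.mk ((if horizontal_first then horizontal ++ vertical else vertical ++ horizontal) ++ ['A'])

-- ===== PORT A =====
-- literal port of A's recursion over the code (generator → the list of yielded strings)
def findAuxA : List Char → Int × Int → List String
  | [], _ => [""]
  | c :: rest, (x, y) =>
    match numLookup c with
    | none => []   -- Python raises KeyError here; excluded by Pre_
    | some (nx, ny) =>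
      let option1 : Option String :=
        if x = 0 ∧ ny = 3 then none else some (make_route x y nx ny false)
      let l1 : List String :=
        match option1 with
        | some o1 => (findAuxA rest (nx, ny)).map (fun r => o1 ++ r)
        | none => []
      let option2 : Option String :=
        if nx = 0 ∧ y = 3 then none else some (make_route x y nx ny true)
      let l2 : List String :=
        match option2 with
        | some o2 =>
          if option1 ≠ some o2 then (findAuxA rest (nx, ny)).map (fun r => o2 ++ r) else []
        | none => []
      l1 ++ l2

def find_numerical_route (code : String) (p : Option (Int × Int)) : List String :=
  findAuxA code.toList (p.getD (2, 3))   -- NUMERICAL_LOOKUP['A'] = (2, 3)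

-- ===== PORT B =====
-- the per-character ordered option list of Source B
def routeOptions (x y nx ny : Int) : List String :=
  let opts : List String := if x = 0 ∧ ny = 3 then [] else [make_route x y nx ny false]
  let h := make_route x y nx ny true
  if ¬(nx = 0 ∧ y = 3) ∧ h ∉ opts then opts ++ [h] else opts

def find_numerical_route_alt (code : String) (p : Option (Int × Int)) : List String :=
  (code.toList.foldl
    (fun (st : (Int × Int) × List String) (c : Char) =>
      match numLookup c with
      | none => st   -- Python raises KeyError here; excluded by Pre_
      | some (nx, ny) =>
        ((nx, ny), st.2.flatMap (fun r => (routeOptions st.1.1 st.1.2 nx ny).map (fun o => r ++ o))))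
    ((p.getD (2, 3)), [""])).2

-- ===== PRECONDITION & SPEC =====
-- Pre_ excludes exactly codes with a character outside the numeric keypad, on which A raises KeyError.
def Pre_find_numerical_route (code : String) (p : Option (Int × Int)) : Prop :=
  (code.toList.all (fun c => c ∈ ['7', '8', '9', '4', '5', '6', '1', '2', '3', '0', 'A'])) = true
instance (code : String) (p : Option (Int × Int)) : Decidable (Pre_find_numerical_route code p) := by
  unfold Pre_find_numerical_route; infer_instance
def pvWitness_find_numerical_route : String × (Option (Int × Int)) := ("029A", none)

def Spec_find_numerical_route (code : String) (p : Option (Int × Int)) (out : List String) : Prop := out = find_numerical_route_alt code p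
instance (code : String) (p : Option (Int × Int)) (out : List String) : Decidable (Spec_find_numerical_route code p out) := by unfold Spec_find_numerical_route; infer_instance

-- ===== CLAIM (what is proved, stated in full; the proofs are below) =====
def Claim_equal_find_numerical_route : Prop := ∀ (code : String) (p : Option (Int × Int)), Dom_find_numerical_route code p → Pre_find_numerical_route code p → Spec_find_numerical_route code p (find_numerical_route code p)

-- ===== LEMMAS AND PROOFS =====

-- reassociation of the partial-route product (String append is associative)
lemma flatMap_step (acc opts R : List String) :
    ((acc.flatMap (fun r => opts.map (fun o => r ++ o))).flatMap (fun r => R.map (fun s => r ++ s)))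
    = acc.flatMap (fun r => (opts.flatMap (fun o => R.map (fun s => o ++ s))).map (fun s => r ++ s)) := by
  induction acc with
  | nil => simp
  | cons a t ih =>
    simp [List.flatMap_append, List.flatMap_map, List.map_flatMap, List.map_map,
      Function.comp_def, String.append_assoc, ih]

-- one step: A's two guarded yields equal the flatMap over B's ordered option list
lemma step_eq (x y nx ny : Int) (R : List String) :
    (let option1 : Option String :=
        if x = 0 ∧ ny = 3 then none else some (make_route x y nx ny false)
      let l1 : List String :=
        match option1 with
        | some o1 => R.map (fun r => o1 ++ r)
        | none => []
      let option2 : Option String :=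
        if nx = 0 ∧ y = 3 then none else some (make_route x y nx ny true)
      let l2 : List String :=
        match option2 with
        | some o2 => if option1 ≠ some o2 then R.map (fun r => o2 ++ r) else []
        | none => []
      l1 ++ l2)
    = (routeOptions x y nx ny).flatMap (fun o => R.map (fun r => o ++ r)) := by
  simp only [routeOptions]
  by_cases h1 : x = 0 ∧ ny = 3 <;> by_cases h2 : nx = 0 ∧ y = 3 <;>
    by_cases h3 : make_route x y nx ny true = make_route x y nx ny false <;>
    simp [h1, h2, h3] <;>
    exact fun h => absurd h.symm h3

lemma foldl_eq (cs : List Char) :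
    ∀ (pos : Int × Int) (acc : List String),
    (∀ c ∈ cs, c ∈ ['7', '8', '9', '4', '5', '6', '1', '2', '3', '0', 'A']) →
    (cs.foldl
      (fun (st : (Int × Int) × List String) (c : Char) =>
        match numLookup c with
        | none => st
        | some (nx, ny) =>
          ((nx, ny), st.2.flatMap (fun r => (routeOptions st.1.1 st.1.2 nx ny).map (fun o => r ++ o))))
      (pos, acc)).2
    = acc.flatMap (fun r => (findAuxA cs pos).map (fun s => r ++ s)) := by
  induction cs with
  | nil => intro pos acc _; simp [findAuxA]
  | cons c cs ih =>
    intro pos acc hv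
    obtain ⟨x, y⟩ := pos
    have hc : c ∈ ['7', '8', '9', '4', '5', '6', '1', '2', '3', '0', 'A'] := hv c (by simp)
    obtain ⟨nx, ny, hl⟩ : ∃ nx ny, numLookup c = some (nx, ny) := by
      fin_cases hc <;> exact ⟨_, _, rfl⟩
    have hrest : ∀ c' ∈ cs, c' ∈ ['7', '8', '9', '4', '5', '6', '1', '2', '3', '0', 'A'] :=
      fun c' h => hv c' (by simp [h])
    simp only [List.foldl_cons, hl]
    rw [ih (nx, ny) _ hrest]
    have hstep := step_eq x y nx ny (findAuxA cs (nx, ny))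
    simp only [findAuxA, hl]
    simp only at hstep
    rw [hstep, flatMap_step]

-- ===== VERDICT (by name: the statement is the Claim_ definition above) =====
theorem find_numerical_route_spec : Claim_equal_find_numerical_route := by
  intro code p _ hpre
  have hv : ∀ c ∈ code.toList, c ∈ ['7', '8', '9', '4', '5', '6', '1', '2', '3', '0', 'A'] := by
    simpa [Pre_find_numerical_route, List.all_eq_true, decide_eq_true_eq] using hpre
  unfold Spec_find_numerical_route find_numerical_route find_numerical_route_alt
  rw [foldl_eq code.toList (p.getD (2, 3)) [""] hv]
  simp
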